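-- pv_equiv track=rewrite | github.com/dongseoki/Studying-algorithms | programmers/징검다리 건너기.py | isItPossibleCase
-- ===== SOURCE A (Python) =====
-- def isItPossibleCase(stones,k,passCnt) -> bool:
--     maxEmptySeriNum = 0
--     curEmptySeriNum = 0
--     for stoneItem in stones:
--         if stoneItem <passCnt:
--             curEmptySeriNum += 1
--         else:
--             if maxEmptySeriNum <curEmptySeriNum:
--                 maxEmptySeriNum = curEmptySeriNum
--             curEmptySeriNum = 0
--     if maxEmptySeriNum <curEmptySeriNum:
--         maxEmptySeriNum = curEmptySeriNum
--
--     if (maxEmptySeriNum+1) > k: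
--         return False
--     else:
--         return True
-- ===== SOURCE B (Python) =====
-- def isItPossibleCase(stones, k, passCnt) -> bool:
--     # Positions of stones that survive passCnt crossings; runs of skipped
--     # stones are the gaps between consecutive surviving positions.
--     boundaries = [-1] + [i for i, s in enumerate(stones) if s >= passCnt] + [len(stones)]
--     maxRun = max(b - a - 1 for a, b in zip(boundaries, boundaries[1:]))
--     return maxRun < k
-- ===== Notes on version B (the rewrite author's own statement) =====
-- stated objective: alternative
-- what changed: Replaces A's stateful single pass with an explicit running counter and reset by computing the index positions of surviving stones (>= passCnt) and taking the maximum gap between consecutive boundary positions; the final check becomes maxRun < k.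
import Mathlib
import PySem

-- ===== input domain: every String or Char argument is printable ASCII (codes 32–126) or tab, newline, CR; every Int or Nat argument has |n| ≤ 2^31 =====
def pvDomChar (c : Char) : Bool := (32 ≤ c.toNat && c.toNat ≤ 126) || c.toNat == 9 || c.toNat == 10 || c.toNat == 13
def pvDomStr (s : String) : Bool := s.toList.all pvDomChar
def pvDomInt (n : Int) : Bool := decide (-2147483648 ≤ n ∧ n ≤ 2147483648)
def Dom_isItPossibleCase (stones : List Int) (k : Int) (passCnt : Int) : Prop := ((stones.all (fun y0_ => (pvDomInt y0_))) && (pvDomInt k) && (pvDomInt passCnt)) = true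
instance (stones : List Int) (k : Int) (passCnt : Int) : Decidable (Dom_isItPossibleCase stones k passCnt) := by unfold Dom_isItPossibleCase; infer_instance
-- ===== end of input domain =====

-- B replaces A's stateful run counter with gap arithmetic between the positions
-- of surviving stones (alternative decomposition; same cost).

-- ===== PORT A =====
def isItPossibleCase (stones : List Int) (k : Int) (passCnt : Int) : Bool :=
  let s := stones.foldl (fun (st : Int × Int) stoneItem =>
      if stoneItem < passCnt then (st.1, st.2 + 1)
      else ((if st.1 < st.2 then st.2 else st.1), 0)) (0, 0)
  let maxEmptySeriNum := if s.1 < s.2 then s.2 else s.1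
  if maxEmptySeriNum + 1 > k then false else true

-- ===== PORT B =====
def isItPossibleCase_alt (stones : List Int) (k : Int) (passCnt : Int) : Bool :=
  let boundaries : List Int :=
    -1 :: (((PySem.List.enumerate stones).filter (fun q => decide (passCnt ≤ q.2))).map (fun q => q.1)
           ++ [(stones.length : Int)])
  let gaps : List Int := (boundaries.zip boundaries.tail).map (fun q => q.2 - q.1 - 1)
  match gaps with
  | [] => false            -- unreachable: boundaries always has ≥ 2 elements
  | g :: gs => decide (gs.foldl max g < k)   -- Python max of a nonempty list

-- ===== PRECONDITION & SPEC =====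
def Spec_isItPossibleCase (stones : List Int) (k : Int) (passCnt : Int) (out : Bool) : Prop := out = isItPossibleCase_alt stones k passCnt
instance (stones : List Int) (k : Int) (passCnt : Int) (out : Bool) : Decidable (Spec_isItPossibleCase stones k passCnt out) := by unfold Spec_isItPossibleCase; infer_instance

-- ===== CLAIM (what is proved, stated in full; the proofs are below) =====
def Claim_equal_isItPossibleCase : Prop := ∀ (stones : List Int) (k : Int) (passCnt : Int), Dom_isItPossibleCase stones k passCnt → Spec_isItPossibleCase stones k passCnt (isItPossibleCase stones k passCnt)

-- ===== LEMMAS AND PROOFS =====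

/-- max run length of consecutive elements `< p`, with `c` the run carried in. -/
def mr (p c : Int) (l : List Int) : Int :=
  match l with
  | [] => c
  | x :: xs => if x < p then mr p (c + 1) xs else max c (mr p 0 xs)

/-- positions (starting at `i`) of elements `≥ p`. -/
def solids (p i : Int) (l : List Int) : List Int :=
  match l with
  | [] => []
  | x :: xs => if p ≤ x then i :: solids p (i + 1) xs else solids p (i + 1) xs

/-- gap list of boundaries `prev :: solids p i l ++ [i + l.length]`. -/
def gapsL (p prev i : Int) (l : List Int) : List Int :=
  match l with
  | [] => [i - prev - 1]
  | x :: xs => if p ≤ x then (i - prev - 1) :: gapsL p i (i + 1) xs else gapsL p prev (i + 1) xs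

lemma mr_ge (p : Int) : ∀ (l : List Int) (c : Int), c ≤ mr p c l := by
  intro l
  induction l with
  | nil => intro c; simp [mr]
  | cons x xs ih =>
    intro c
    simp only [mr]
    split
    · exact le_trans (by omega) (ih (c + 1))
    · exact le_max_left _ _

lemma foldA (p : Int) : ∀ (l : List Int) (m c : Int),
    (let s := l.foldl (fun (st : Int × Int) stoneItem =>
        if stoneItem < p then (st.1, st.2 + 1)
        else ((if st.1 < st.2 then st.2 else st.1), 0)) (m, c)
     (if s.1 < s.2 then s.2 else s.1)) = max m (mr p c l) := by
  intro l
  induction l with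
  | nil => intro m c; simp [mr]; omega
  | cons x xs ih =>
    intro m c
    simp only [List.foldl_cons, mr]
    by_cases h : x < p
    · simp only [if_pos h]
      exact ih m (c + 1)
    · simp only [if_neg h]
      rw [ih ((if m < c then c else m)) 0]
      have : (if m < c then c else m) = max m c := by omega
      rw [this, max_assoc]

lemma enum_filter (p : Int) : ∀ (l : List Int) (i : Int),
    ((PySem.List.enumerate l i).filter (fun q => decide (p ≤ q.2))).map (fun q => q.1)
      = solids p i l := by
  intro l
  induction l with
  | nil => intro i; simp [PySem.List.enumerate_nil, solids]
  | cons x xs ih =>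
    intro i
    rw [PySem.List.enumerate_cons]
    simp only [List.filter_cons, solids]
    by_cases h : p ≤ x
    · simp [h, ih]
    · simp [h, ih]

lemma zip_gaps (p : Int) : ∀ (l : List Int) (prev i : Int),
    (((prev :: (solids p i l ++ [i + (l.length : Int)])).zip
        (solids p i l ++ [i + (l.length : Int)])).map (fun q => q.2 - q.1 - 1))
      = gapsL p prev i l := by
  intro l
  induction l with
  | nil => intro prev i; simp [solids, gapsL]
  | cons x xs ih =>
    intro prev i
    simp only [solids, gapsL]
    by_cases h : p ≤ x
    · simp only [if_pos h]
      have harith : i + ((x :: xs).length : Int) = (i + 1) + (xs.length : Int) := by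
        simp; omega
      rw [harith]
      simp only [List.cons_append, List.zip_cons_cons, List.map_cons]
      exact congrArg _ (ih i (i + 1))
    · simp only [if_neg h]
      have harith : i + ((x :: xs).length : Int) = (i + 1) + (xs.length : Int) := by
        simp; omega
      rw [harith]
      exact ih prev (i + 1)

lemma foldmax_gapsL (p : Int) : ∀ (l : List Int) (prev i a : Int),
    (gapsL p prev i l).foldl max a = max a (mr p (i - prev - 1) l) := by
  intro l
  induction l with
  | nil => intro prev i a; simp [gapsL, mr]
  | cons x xs ih =>
    intro prev i a
    simp only [gapsL, mr]
    by_cases h : p ≤ x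
    · simp only [if_pos h, if_neg (by omega : ¬ x < p), List.foldl_cons]
      rw [ih i (i + 1) (max a (i - prev - 1))]
      have : (i + 1) - i - 1 = 0 := by omega
      rw [this, max_assoc]
    · simp only [if_neg h, if_pos (by omega : x < p)]
      rw [ih prev (i + 1) a]
      have : (i + 1) - prev - 1 = (i - prev - 1) + 1 := by omega
      rw [this]

lemma gapsL_head (p : Int) : ∀ (l : List Int) (prev i : Int) (g : Int) (gs : List Int),
    gapsL p prev i l = g :: gs → gs.foldl max g = mr p (i - prev - 1) l := by
  intro l
  induction l with
  | nil =>
    intro prev i g gs h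
    simp only [gapsL] at h
    cases h
    simp [mr]
  | cons x xs ih =>
    intro prev i g gs h
    simp only [gapsL, mr] at h ⊢
    by_cases hx : p ≤ x
    · rw [if_pos hx] at h
      cases h
      rw [if_neg (by omega : ¬ x < p)]
      rw [foldmax_gapsL p xs i (i + 1) (i - prev - 1)]
      have : (i + 1) - i - 1 = 0 := by omega
      rw [this]
    · rw [if_neg hx] at h
      rw [if_pos (by omega : x < p)]
      have := ih prev (i + 1) g gs h
      have harith : (i + 1) - prev - 1 = (i - prev - 1) + 1 := by omega
      rw [harith] at this
      exact this

lemma gapsL_ne_nil (p : Int) : ∀ (l : List Int) (prev i : Int), gapsL p prev i l ≠ [] := by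
  intro l
  induction l with
  | nil => intro prev i; simp [gapsL]
  | cons x xs ih =>
    intro prev i
    simp only [gapsL]
    split
    · simp
    · exact ih prev (i + 1)

-- ===== VERDICT (by name: the statement is the Claim_ definition above) =====
theorem isItPossibleCase_spec : Claim_equal_isItPossibleCase := by
  intro stones k passCnt _
  unfold Spec_isItPossibleCase isItPossibleCase isItPossibleCase_alt
  rw [enum_filter passCnt stones 0]
  have hz : ((((-1 : Int) :: (solids passCnt 0 stones ++ [(stones.length : Int)])).zip
        (solids passCnt 0 stones ++ [(stones.length : Int)])).map (fun q => q.2 - q.1 - 1))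
      = gapsL passCnt (-1) 0 stones := by
    have := zip_gaps passCnt stones (-1) 0
    simpa using this
  simp only [List.tail_cons]
  rw [hz]
  rw [foldA passCnt stones 0 0]
  cases hg : gapsL passCnt (-1) 0 stones with
  | nil => exact absurd hg (gapsL_ne_nil passCnt stones (-1) 0)
  | cons g gs =>
    have hmax := gapsL_head passCnt stones (-1) 0 g gs hg
    have h0 : (0 : Int) - (-1) - 1 = 0 := by omega
    rw [h0] at hmax
    show (if max 0 (mr passCnt 0 stones) + 1 > k then false else true) = decide (gs.foldl max g < k)
    rw [hmax]
    have hge : (0 : Int) ≤ mr passCnt 0 stones := mr_ge passCnt stones 0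
    have hmx : max (0 : Int) (mr passCnt 0 stones) = mr passCnt 0 stones := by omega
    rw [hmx]
    by_cases hk : mr passCnt 0 stones + 1 > k
    · rw [if_pos hk]
      simp; omega
    · rw [if_neg hk]
      simp; omega
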